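-- pv_equiv track=rewrite | github.com/AhmedZatar/Game-of-Greed | game_of_greed/game.py | cheat
-- ===== SOURCE A (Python) =====
-- def cheat(dice,userselect):
--   dice = list(dice)
--
--   if len(userselect)>len(dice):
--     print ('Cheater!!! Or possibly made a typo...')
--     return False
--   for i in userselect:
--     if i in dice:
--       dice.remove(i)
--     else:
--       print ('Cheater!!! Or possibly made a typo...')
--       return False
--   return True
-- ===== SOURCE B (Python) =====
-- def cheat(dice, userselect):
--     if all(userselect.count(x) <= dice.count(x) for x in set(userselect)):
--         return True
--     print('Cheater!!! Or possibly made a typo...')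
--     return False
-- ===== Notes on version B (the rewrite author's own statement) =====
-- stated objective: idiomatic
-- what changed: Replaces the element-by-element loop with in-place list.remove (plus a separate length guard) by a single multiset-inclusion test comparing per-element counts over the distinct selected values.
import Mathlib
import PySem

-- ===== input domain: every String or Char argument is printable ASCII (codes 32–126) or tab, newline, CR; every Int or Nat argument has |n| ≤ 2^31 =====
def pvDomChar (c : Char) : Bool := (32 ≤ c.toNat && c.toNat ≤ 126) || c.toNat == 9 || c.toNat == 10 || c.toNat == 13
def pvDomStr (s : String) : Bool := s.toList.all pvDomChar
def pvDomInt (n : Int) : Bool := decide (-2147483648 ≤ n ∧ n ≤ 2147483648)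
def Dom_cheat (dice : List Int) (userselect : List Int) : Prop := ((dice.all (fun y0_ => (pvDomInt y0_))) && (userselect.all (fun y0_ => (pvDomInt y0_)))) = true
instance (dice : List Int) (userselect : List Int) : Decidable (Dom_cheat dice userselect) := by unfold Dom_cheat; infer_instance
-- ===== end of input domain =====

-- B replaces A's destructive remove-loop (plus separate length guard) with a per-element
-- count comparison over the distinct selected values (idiomatic multiset-inclusion test);
-- equivalence is about the return value only (both print the same message on failure).

-- ===== PORT A =====
-- the 'for i in userselect' loop: mutable dice, early 'return False'
def cheatLoop (dice : List Int) (userselect : List Int) : Bool :=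
  match userselect with
  | [] => true
  | i :: rest =>
    if dice.contains i then
      match PySem.List.remove? dice i with
      | some d => cheatLoop d rest
      | none => false   -- unreachable: the guard 'i in dice' guarantees remove succeeds
    else false

def cheat (dice : List Int) (userselect : List Int) : Bool :=
  if userselect.length > dice.length then false
  else cheatLoop dice userselect

-- ===== PORT B =====
def cheat_alt (dice : List Int) (userselect : List Int) : Bool :=
  if (PySem.Set.ofList userselect).all
      (fun x => PySem.List.count userselect x ≤ PySem.List.count dice x)
  then true
  else false

-- ===== PRECONDITION & SPEC =====
def Spec_cheat (dice : List Int) (userselect : List Int) (out : Bool) : Prop := out = cheat_alt dice userselect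
instance (dice : List Int) (userselect : List Int) (out : Bool) : Decidable (Spec_cheat dice userselect out) := by unfold Spec_cheat; infer_instance

-- ===== CLAIM (what is proved, stated in full; the proofs are below) =====
def Claim_equal_cheat : Prop := ∀ (dice : List Int) (userselect : List Int), Dom_cheat dice userselect → Spec_cheat dice userselect (cheat dice userselect)

-- ===== LEMMAS AND PROOFS =====

-- A's loop decides the sub-multiset condition
theorem cheatLoop_eq (userselect : List Int) (dice : List Int) :
    cheatLoop dice userselect
      = decide (∀ x ∈ userselect, userselect.count x ≤ dice.count x) := by
  induction userselect generalizing dice with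
  | nil => simp [cheatLoop]
  | cons i rest ih =>
    by_cases hi : i ∈ dice
    · rw [cheatLoop]
      simp only [List.contains_eq_mem, hi, decide_true, if_true,
        PySem.List.remove?_eq_some_erase dice i hi]
      rw [ih]
      have key : (∀ x ∈ rest, rest.count x ≤ (dice.erase i).count x) ↔
          (∀ x ∈ i :: rest, (i :: rest).count x ≤ dice.count x) := by
        constructor
        · intro h x hx
          rcases eq_or_ne x i with rfl | hne
          · have := h x
            by_cases hr : x ∈ rest
            · have h1 := h x hr
              rw [List.count_erase_self] at h1
              have hc : 1 ≤ dice.count x := (List.count_pos_iff).2 hi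
              simp [List.count_cons_self]
              omega
            · have h0 : rest.count x = 0 := List.count_eq_zero.2 hr
              have hc : 1 ≤ dice.count x := (List.count_pos_iff).2 hi
              simp [List.count_cons_self, h0]
              omega
          · have hx' : x ∈ rest := by
              rcases List.mem_cons.1 hx with h | h
              · exact absurd h hne
              · exact h
            have h1 := h x hx'
            rw [List.count_erase_of_ne hne] at h1
            simpa [List.count_cons_of_ne hne.symm] using h1
        · intro h x hx
          rcases eq_or_ne x i with rfl | hne
          · have h1 := h x (List.mem_cons_self)
            rw [List.count_cons_self] at h1
            rw [List.count_erase_self]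
            omega
          · have h1 := h x (List.mem_cons_of_mem _ hx)
            rw [List.count_cons_of_ne hne.symm] at h1
            rw [List.count_erase_of_ne hne]
            exact h1
      simp only [decide_eq_decide]
      exact key
    · rw [cheatLoop]
      simp only [List.contains_eq_mem, hi, decide_false]
      have hna : ¬ (∀ x ∈ i :: rest, (i :: rest).count x ≤ dice.count x) := by
        intro h
        have h1 := h i (List.mem_cons_self)
        have h0 : dice.count i = 0 := List.count_eq_zero.2 hi
        rw [List.count_cons_self, h0] at h1
        omega
      exact (decide_eq_false hna).symm

-- the sub-multiset condition forces length ≤ (so A's separate guard is redundant when it holds)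
theorem length_le_of_sub (dice userselect : List Int)
    (h : ∀ x ∈ userselect, userselect.count x ≤ dice.count x) :
    userselect.length ≤ dice.length := by
  have hsub : userselect.Subperm dice := List.subperm_ext_iff.2 (fun x hx => h x hx)
  exact hsub.length_le

theorem cheat_alt_eq (dice userselect : List Int) :
    cheat_alt dice userselect
      = decide (∀ x ∈ userselect, userselect.count x ≤ dice.count x) := by
  unfold cheat_alt
  by_cases h : ∀ x ∈ userselect, userselect.count x ≤ dice.count x
  · have : (PySem.Set.ofList userselect).all
        (fun x => PySem.List.count userselect x ≤ PySem.List.count dice x) = true := by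
      rw [List.all_eq_true]
      intro x hx
      have hx' : x ∈ userselect := (PySem.Set.mem_ofList userselect x).1 hx
      simpa [PySem.List.count] using h x hx'
    rw [if_pos this, decide_eq_true h]
  · have : ¬ (PySem.Set.ofList userselect).all
        (fun x => PySem.List.count userselect x ≤ PySem.List.count dice x) = true := by
      rw [List.all_eq_true]
      intro hall
      apply h
      intro x hx
      have := hall x ((PySem.Set.mem_ofList userselect x).2 hx)
      simpa [PySem.List.count] using this
    rw [if_neg this, decide_eq_false h]

-- ===== VERDICT (by name: the statement is the Claim_ definition above) =====
theorem cheat_spec : Claim_equal_cheat := by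
  intro dice userselect _
  unfold Spec_cheat cheat
  rw [cheat_alt_eq, cheatLoop_eq]
  by_cases hlen : userselect.length > dice.length
  · simp only [hlen, if_true]
    have : ¬ (∀ x ∈ userselect, userselect.count x ≤ dice.count x) := by
      intro h
      exact absurd (length_le_of_sub dice userselect h) (by omega)
    simp [this]
  · simp [hlen]
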